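-- pv_equiv track=rewrite | github.com/KonstantinosAng/CodeWars | Python/[6 kyu] FIRE and FURY.py | fire_and_fury
-- ===== SOURCE A (Python) =====
-- def fire_and_fury(tweet):
--   booleans = [True if x in ['F', 'I', 'R', 'E', 'U', 'Y'] else False for x in tweet]
--   if False in booleans: return "Fake tweet."
--   pointer = 0
--   retArray = []
--   tempWord = ("", 0)
--   while pointer + 3 < len(tweet):
--     string = tweet[pointer:pointer + 4]
--     if string in ['FURY', 'FIRE']:
--       if tempWord[0] == "":
--         tempWord = (string, tempWord[1]+1)
--       else:
--         if string == tempWord[0]: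
--           tempWord = (string, tempWord[1]+1)
--         else:
--           if tempWord[0] == 'FURY':
--             retArray.append("I am " + 'really '*(tempWord[1]-1) + "furious.")
--           else:
--             retArray.append("You " + 'and you '*(tempWord[1]-1) + "are fired!")
--           tempWord = (string, 1)
--     pointer += 1
--   if tempWord[0] != "":
--     if tempWord[0] == 'FURY':
--       retArray.append("I am " + 'really '*(tempWord[1]-1) + "furious.")
--     else:
--       retArray.append("You " + 'and you '*(tempWord[1]-1) + "are fired!")
--     return " ".join(x for x in retArray)
--   return "Fake tweet."
-- ===== SOURCE B (Python) =====
-- def _runs(ms):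
--     if not ms:
--         return []
--     w = ms[0]
--     k = 1
--     while k < len(ms) and ms[k] == w:
--         k += 1
--     return [(w, k)] + _runs(ms[k:])
--
--
-- def _phrase(w, n):
--     if w == 'FURY':
--         return "I am " + "really " * (n - 1) + "furious."
--     return "You " + "and you " * (n - 1) + "are fired!"
--
--
-- def fire_and_fury(tweet):
--     if any(c not in 'FIREUY' for c in tweet):
--         return "Fake tweet."
--     matches = [tweet[i:i + 4] for i in range(len(tweet) - 3)
--                if tweet[i:i + 4] in ('FURY', 'FIRE')]
--     if not matches:
--         return "Fake tweet."
--     return " ".join(_phrase(w, n) for w, n in _runs(matches))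
-- ===== Notes on version B (the rewrite author's own statement) =====
-- stated objective: simpler
-- what changed: A's single stateful while-loop (pointer, open-run sentinel tuple, phrase emission interleaved) is replaced by three clear phases: validate the letter set, collect the matched 4-char windows with one comprehension, then run-length group that list recursively and render one phrase per run.
import Mathlib
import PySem

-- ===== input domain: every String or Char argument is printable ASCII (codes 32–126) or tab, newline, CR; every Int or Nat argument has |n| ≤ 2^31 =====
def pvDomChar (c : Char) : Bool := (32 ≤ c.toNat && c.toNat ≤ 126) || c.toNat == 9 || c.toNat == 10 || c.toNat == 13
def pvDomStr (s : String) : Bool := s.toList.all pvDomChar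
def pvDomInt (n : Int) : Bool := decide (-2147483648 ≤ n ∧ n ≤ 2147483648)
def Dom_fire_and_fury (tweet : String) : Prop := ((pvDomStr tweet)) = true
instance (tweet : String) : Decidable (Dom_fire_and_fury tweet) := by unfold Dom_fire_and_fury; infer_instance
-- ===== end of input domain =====

-- B rewrites A's single stateful while-loop as three clear phases (validate, collect matched
-- windows, run-length group and render); objective: simpler, no speed claim.

-- ===== PORT A =====
-- A's duplicated phrase-append expression (it appears verbatim twice in A's source)
def pvPhraseA (w : List Char) (k : Int) : List Char :=
  if w = "FURY".toList then
    "I am ".toList ++ PySem.List.pyRepeat "really ".toList (k - 1) ++ "furious.".toList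
  else
    "You ".toList ++ PySem.List.pyRepeat "and you ".toList (k - 1) ++ "are fired!".toList

def fire_and_fury (tweet : String) : String :=
  let cs := tweet.toList
  let booleans := cs.map (fun x => if x ∈ (['F', 'I', 'R', 'E', 'U', 'Y'] : List Char) then true else false)
  if false ∈ booleans then "Fake tweet."
  else
    -- while pointer + 3 < len(tweet), pointer += 1: pointers 0, 1, …, len-4
    let st := (PySem.List.pyRange 0 ((cs.length : Int) - 3) 1).foldl
      (fun (st : List (List Char) × (List Char × Int)) pointer =>
        let string := PySem.List.slice cs (some pointer) (some (pointer + 4))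
        if string ∈ ["FURY".toList, "FIRE".toList] then
          if st.2.1 = [] then (st.1, (string, st.2.2 + 1))
          else if string = st.2.1 then (st.1, (string, st.2.2 + 1))
          else (st.1 ++ [pvPhraseA st.2.1 st.2.2], (string, 1))
        else st)
      ([], ([], 0))
    if st.2.1 ≠ [] then String.ofList (PySem.Chars.join [' '] (st.1 ++ [pvPhraseA st.2.1 st.2.2]))
    else "Fake tweet."

-- ===== PORT B =====
-- port of Source B's _runs: split the match list into maximal runs, recursively
def pvRunsB : List (List Char) → List (List Char × Nat)
  | [] => []
  | w :: rest =>
      (w, (rest.takeWhile (fun x => x = w)).length + 1)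
        :: pvRunsB (rest.drop (rest.takeWhile (fun x => x = w)).length)
  termination_by ms => ms.length
  decreasing_by
    simp only [List.length_drop, List.length_cons]
    omega

-- port of Source B's _phrase
def pvPhraseB (r : List Char × Nat) : List Char :=
  if r.1 = "FURY".toList then
    "I am ".toList ++ (List.replicate (r.2 - 1) "really ".toList).flatten ++ "furious.".toList
  else
    "You ".toList ++ (List.replicate (r.2 - 1) "and you ".toList).flatten ++ "are fired!".toList

def fire_and_fury_alt (tweet : String) : String :=
  let cs := tweet.toList
  if cs.any (fun c => decide (¬ c ∈ "FIREUY".toList)) then "Fake tweet."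
  else
    let ms := (PySem.List.pyRange 0 ((cs.length : Int) - 3) 1).filterMap
      (fun i =>
        let w := PySem.List.slice cs (some i) (some (i + 4))
        if w ∈ ["FURY".toList, "FIRE".toList] then some w else none)
    if ms = [] then "Fake tweet."
    else String.ofList (PySem.Chars.join [' '] ((pvRunsB ms).map pvPhraseB))

-- ===== PRECONDITION & SPEC =====
def Spec_fire_and_fury (tweet : String) (out : String) : Prop := out = fire_and_fury_alt tweet
instance (tweet : String) (out : String) : Decidable (Spec_fire_and_fury tweet out) := by unfold Spec_fire_and_fury; infer_instance

-- ===== CLAIM (what is proved, stated in full; the proofs are below) =====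
def Claim_equal_fire_and_fury : Prop := ∀ (tweet : String), Dom_fire_and_fury tweet → Spec_fire_and_fury tweet (fire_and_fury tweet)

-- ===== LEMMAS AND PROOFS =====

-- A's loop body on a matched window, as a named step function (definitionally A's inline branches)
def pvStep (st : List (List Char) × (List Char × Int)) (string : List Char) :
    List (List Char) × (List Char × Int) :=
  if st.2.1 = [] then (st.1, (string, st.2.2 + 1))
  else if string = st.2.1 then (st.1, (string, st.2.2 + 1))
  else (st.1 ++ [pvPhraseA st.2.1 st.2.2], (string, 1))

-- left-to-right run grouping with an open run (proof bridge between A's fold and pvRunsB)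
def pvGroupAux (w : List Char) (k : Nat) : List (List Char) → List (List Char × Nat)
  | [] => [(w, k)]
  | x :: xs => if x = w then pvGroupAux w (k + 1) xs else (w, k) :: pvGroupAux x 1 xs

lemma pv_dropWhile_eq_drop (p : List Char → Bool) (xs : List (List Char)) :
    xs.drop (xs.takeWhile p).length = xs.dropWhile p := by
  induction xs with
  | nil => simp
  | cons x xs ih =>
      by_cases h : p x
      · simp [h, ih]
      · simp [h]

lemma pv_runsB_cons (x : List Char) (xs : List (List Char)) :
    pvRunsB (x :: xs)
      = (x, (xs.takeWhile (fun y => y = x)).length + 1)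
          :: pvRunsB (xs.dropWhile (fun y => y = x)) := by
  rw [pvRunsB.eq_def]
  dsimp only
  rw [pv_dropWhile_eq_drop]

lemma pv_groupAux_eq (xs : List (List Char)) : ∀ (w : List Char) (k : Nat),
    pvGroupAux w k xs
      = (w, k + (xs.takeWhile (fun y => y = w)).length)
          :: pvRunsB (xs.dropWhile (fun y => y = w)) := by
  induction xs with
  | nil => intro w k; simp [pvGroupAux, pvRunsB]
  | cons x xs ih =>
      intro w k
      by_cases h : x = w
      · subst h
        simp only [pvGroupAux, ih, List.takeWhile_cons, List.dropWhile_cons,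
          decide_true]
        simp [Nat.add_comm, Nat.add_assoc]
      · simp only [pvGroupAux, if_neg h, ih, List.takeWhile_cons, List.dropWhile_cons]
        simp [h, pv_runsB_cons, Nat.add_comm]

lemma pv_groupAux_runs (x : List Char) (xs : List (List Char)) :
    pvGroupAux x 1 xs = pvRunsB (x :: xs) := by
  rw [pv_groupAux_eq, pv_runsB_cons, Nat.add_comm]

lemma pv_phrase_eq (w : List Char) (k : Int) (hk : 1 ≤ k) :
    pvPhraseA w k = pvPhraseB (w, k.toNat) := by
  have h : (k - 1).toNat = k.toNat - 1 := by omega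
  simp [pvPhraseA, pvPhraseB, PySem.List.pyRepeat, h]

lemma pv_loop (ms : List (List Char)) : ∀ (ret : List (List Char)) (w : List Char) (k : Int),
    w ≠ [] → 1 ≤ k → (∀ x ∈ ms, x ≠ []) →
    (ms.foldl pvStep (ret, (w, k))).2.1 ≠ [] ∧
    (ms.foldl pvStep (ret, (w, k))).1
        ++ [pvPhraseA (ms.foldl pvStep (ret, (w, k))).2.1 (ms.foldl pvStep (ret, (w, k))).2.2]
      = ret ++ (pvGroupAux w k.toNat ms).map pvPhraseB := by
  induction ms with
  | nil =>
      intro ret w k hw hk _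
      simp [pvGroupAux, hw, pv_phrase_eq w k hk]
  | cons x xs ih =>
      intro ret w k hw hk hne
      have hx : x ≠ [] := hne x (by simp)
      have hxs : ∀ y ∈ xs, y ≠ [] := fun y hy => hne y (by simp [hy])
      by_cases hxw : x = w
      · have hstep : pvStep (ret, (w, k)) x = (ret, (w, k + 1)) := by
          simp [pvStep, hw, hxw]
        have h := ih ret w (k + 1) hw (by omega) hxs
        rw [List.foldl_cons, hstep]
        refine ⟨h.1, ?_⟩
        rw [h.2]
        have hk1 : (k + 1).toNat = k.toNat + 1 := by omega
        simp [pvGroupAux, hxw, hk1]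
      · have hstep : pvStep (ret, (w, k)) x = (ret ++ [pvPhraseA w k], (x, 1)) := by
          simp [pvStep, hw, hxw]
        have h := ih (ret ++ [pvPhraseA w k]) x 1 hx (by omega) hxs
        rw [List.foldl_cons, hstep]
        refine ⟨h.1, ?_⟩
        rw [h.2]
        simp only [pvGroupAux, if_neg hxw, List.map_cons]
        rw [pv_phrase_eq w k hk]
        simp

lemma pv_fold_filter (l : List Int) (g : Int → List Char) :
    ∀ (init : List (List Char) × (List Char × Int)),
    l.foldl (fun st i => if g i ∈ ["FURY".toList, "FIRE".toList] then pvStep st (g i) else st) init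
      = (l.filterMap (fun i =>
          if g i ∈ ["FURY".toList, "FIRE".toList] then some (g i) else none)).foldl pvStep init := by
  induction l with
  | nil => intro init; simp
  | cons x xs ih =>
      intro init
      rw [List.foldl_cons]
      by_cases h : g x ∈ ["FURY".toList, "FIRE".toList]
      · have hf : (List.filterMap (fun i =>
            if g i ∈ ["FURY".toList, "FIRE".toList] then some (g i) else none) (x :: xs))
            = g x :: List.filterMap (fun i =>
            if g i ∈ ["FURY".toList, "FIRE".toList] then some (g i) else none) xs := by
          simp only [List.filterMap_cons, if_pos h]
        rw [if_pos h, ih, hf, List.foldl_cons]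
      · have hf : (List.filterMap (fun i =>
            if g i ∈ ["FURY".toList, "FIRE".toList] then some (g i) else none) (x :: xs))
            = List.filterMap (fun i =>
            if g i ∈ ["FURY".toList, "FIRE".toList] then some (g i) else none) xs := by
          simp only [List.filterMap_cons, if_neg h]
        rw [if_neg h, ih, hf]

lemma pv_matches_ne (cs : List Char) (x : List Char)
    (hx : x ∈ (PySem.List.pyRange 0 ((cs.length : Int) - 3) 1).filterMap
      (fun i =>
        let w := PySem.List.slice cs (some i) (some (i + 4))
        if w ∈ ["FURY".toList, "FIRE".toList] then some w else none)) : x ≠ [] := by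
  rw [List.mem_filterMap] at hx
  obtain ⟨i, _, h⟩ := hx
  simp only at h
  split_ifs at h with hm
  · rw [Option.some.injEq] at h
    subst h
    rw [List.mem_cons, List.mem_singleton] at hm
    rcases hm with hm | hm
    · rw [hm]; decide
    · rw [hm]; decide

lemma pv_cond_iff (cs : List Char) :
    (false ∈ cs.map (fun x => if x ∈ (['F', 'I', 'R', 'E', 'U', 'Y'] : List Char) then true else false))
      ↔ (cs.any (fun c => decide (¬ c ∈ "FIREUY".toList)) = true) := by
  have hL : "FIREUY".toList = ['F', 'I', 'R', 'E', 'U', 'Y'] := rfl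
  rw [hL]
  simp [List.mem_map, List.any_eq_true]

-- ===== VERDICT (by name: the statement is the Claim_ definition above) =====
theorem fire_and_fury_spec : Claim_equal_fire_and_fury := by
  intro tweet _
  unfold Spec_fire_and_fury fire_and_fury fire_and_fury_alt
  simp only []
  set cs := tweet.toList with hcs
  by_cases hbad : false ∈ cs.map (fun x => if x ∈ (['F', 'I', 'R', 'E', 'U', 'Y'] : List Char) then true else false)
  · rw [if_pos hbad, if_pos ((pv_cond_iff cs).mp hbad)]
  · rw [if_neg hbad, if_neg (fun h => hbad ((pv_cond_iff cs).mpr h))]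
    have hfold := pv_fold_filter (PySem.List.pyRange 0 ((cs.length : Int) - 3) 1)
      (fun i => PySem.List.slice cs (some i) (some (i + 4))) ([], ([], 0))
    rw [show ((PySem.List.pyRange 0 ((cs.length : Int) - 3) 1).foldl
      (fun (st : List (List Char) × (List Char × Int)) pointer =>
        let string := PySem.List.slice cs (some pointer) (some (pointer + 4))
        if string ∈ ["FURY".toList, "FIRE".toList] then
          if st.2.1 = [] then (st.1, (string, st.2.2 + 1))
          else if string = st.2.1 then (st.1, (string, st.2.2 + 1))
          else (st.1 ++ [pvPhraseA st.2.1 st.2.2], (string, 1))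
        else st)
      ([], ([], 0)))
      = ((PySem.List.pyRange 0 ((cs.length : Int) - 3) 1).foldl
        (fun st i => if (PySem.List.slice cs (some i) (some (i + 4))) ∈ ["FURY".toList, "FIRE".toList]
          then pvStep st (PySem.List.slice cs (some i) (some (i + 4))) else st) ([], ([], 0)))
      from rfl]
    rw [hfold]
    set ms := (PySem.List.pyRange 0 ((cs.length : Int) - 3) 1).filterMap
      (fun i =>
        if (PySem.List.slice cs (some i) (some (i + 4))) ∈ ["FURY".toList, "FIRE".toList]
          then some (PySem.List.slice cs (some i) (some (i + 4))) else none) with hms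
    have hmsne : ∀ x ∈ ms, x ≠ [] := by
      intro x hx
      exact pv_matches_ne cs x (by exact hms ▸ hx)
    clear_value ms
    clear hms
    cases ms with
    | nil => simp
    | cons m rest =>
        have hm : m ≠ [] := hmsne m (by simp)
        have hrest : ∀ y ∈ rest, y ≠ [] := fun y hy => hmsne y (by simp [hy])
        have hstep0 : pvStep ([], ([], 0)) m = ([], (m, 1)) := by simp [pvStep]
        have h := pv_loop rest [] m 1 hm (by omega) hrest
        rw [List.foldl_cons, hstep0]
        rw [if_pos h.1, if_neg (by simp)]
        rw [h.2]
        simp only [Int.toNat_one, List.nil_append]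
        rw [pv_groupAux_runs]
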